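-- pv_equiv track=rewrite | github.com/alansaji360/NeuroForge | test_isolate.py | detect_blinks
-- ===== SOURCE A (Python) =====
-- def detect_blinks(data, threshold=1500, min_distance=50):
--     """Detect blinks based on amplitude threshold crossing."""
--     blink_indices = []
--     last_blink_index = -min_distance  # Initialize to a negative value
--     for i in range(1, len(data)):
--         # Detect if the amplitude crosses the threshold (blink detection)
--         if data[i] > threshold and (i - last_blink_index) > min_distance:
--             blink_indices.append(i)
--             last_blink_index = i
--     return blink_indices
-- ===== SOURCE B (Python) =====
-- def detect_blinks(data, threshold=1500, min_distance=50):
--     """Detect blinks based on amplitude threshold crossing."""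
--     # Stage 1: collect every above-threshold index (index 0 excluded, as in the task).
--     candidates = [i for i in range(1, len(data)) if data[i] > threshold]
--     # Stage 2: interval-scheduling-style greedy on the candidate list alone:
--     # take its head, then rebuild the list keeping only candidates outside
--     # the head's refractory window, until it is exhausted.
--     blink_indices = []
--     while candidates:
--         first = candidates[0]
--         blink_indices.append(first)
--         candidates = [c for c in candidates[1:] if c - first > min_distance]
--     return blink_indices
-- ===== Notes on version B (the rewrite author's own statement) =====
-- stated objective: alternative
-- what changed: Replaced the single pass that scans every sample while maintaining a last_blink_index anchor by two stages: a comprehension first extracts the above-threshold candidate indices, then an anchor-free greedy repeatedly takes the head of the candidate list and rebuilds the list with only the candidates outside the head's refractory window (as in interval-scheduling greedy).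
import Mathlib
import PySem

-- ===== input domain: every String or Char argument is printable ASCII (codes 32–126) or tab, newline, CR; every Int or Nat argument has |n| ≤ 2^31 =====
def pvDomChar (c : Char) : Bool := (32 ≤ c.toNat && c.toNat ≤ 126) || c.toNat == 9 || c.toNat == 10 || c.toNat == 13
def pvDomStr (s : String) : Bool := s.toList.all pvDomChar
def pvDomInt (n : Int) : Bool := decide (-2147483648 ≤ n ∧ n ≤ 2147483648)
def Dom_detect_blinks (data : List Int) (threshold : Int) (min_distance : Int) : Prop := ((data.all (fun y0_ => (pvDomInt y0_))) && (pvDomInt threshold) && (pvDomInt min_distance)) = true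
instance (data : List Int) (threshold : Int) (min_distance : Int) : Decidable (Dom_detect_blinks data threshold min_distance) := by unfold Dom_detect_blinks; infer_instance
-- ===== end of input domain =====

-- B stages the work differently (extract the above-threshold candidate indices first, then an
-- anchor-free greedy that rebuilds the candidate list after each pick); same return value, proved.

-- ===== PORT A =====
-- for i in range(1, len(data)) with state (blink_indices, last_blink_index);
-- data[i] is ported with pyGetD (exact: every i drawn from the range is in bounds).
def detect_blinks (data : List Int) (threshold : Int) (min_distance : Int) : List Int :=
  (List.foldl
    (fun (st : List Int × Int) (i : Int) =>
      if PySem.List.pyGetD data i 0 > threshold ∧ i - st.2 > min_distance then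
        (st.1 ++ [i], i)
      else st)
    ([], -min_distance)
    (PySem.List.pyRange 1 data.length 1)).1

-- ===== PORT B =====
-- stage 2 of Source B: while candidates: take the head, keep only the tail's candidates
-- outside the head's refractory window, repeat.
def greedyPick (min_distance : Int) : List Int → List Int
  | [] => []
  | c :: cs => c :: greedyPick min_distance (cs.filter (fun x => decide (x - c > min_distance)))
termination_by l => l.length
decreasing_by
  have h := List.length_filter_le (fun x : {x // x ∈ cs} => decide ((x : Int) - c > min_distance)) cs.attach
  simp only [List.length_attach] at h
  simpa using Nat.lt_succ_of_le h

-- stage 1 of Source B: the above-threshold candidate indices from range(1, len(data)).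
def detect_blinks_alt (data : List Int) (threshold : Int) (min_distance : Int) : List Int :=
  greedyPick min_distance
    ((PySem.List.pyRange 1 data.length 1).filter
      (fun j => decide (PySem.List.pyGetD data j 0 > threshold)))

-- ===== PRECONDITION & SPEC =====
def Spec_detect_blinks (data : List Int) (threshold : Int) (min_distance : Int) (out : List Int) : Prop := out = detect_blinks_alt data threshold min_distance
instance (data : List Int) (threshold : Int) (min_distance : Int) (out : List Int) : Decidable (Spec_detect_blinks data threshold min_distance out) := by unfold Spec_detect_blinks; infer_instance

-- ===== CLAIM (what is proved, stated in full; the proofs are below) =====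
def Claim_equal_detect_blinks : Prop := ∀ (data : List Int) (threshold : Int) (min_distance : Int), Dom_detect_blinks data threshold min_distance → Spec_detect_blinks data threshold min_distance (detect_blinks data threshold min_distance)

-- ===== LEMMAS AND PROOFS =====

-- A's loop rewritten as a structural recursion on the cursor (proof-side helper).
def aLoop (data : List Int) (threshold : Int) (min_distance : Int) (i : Nat) (last : Int) : List Int :=
  if h : i < data.length then
    if PySem.List.pyGetD data (i : Int) 0 > threshold ∧ (i : Int) - last > min_distance then
      (i : Int) :: aLoop data threshold min_distance (i + 1) (i : Int)
    else
      aLoop data threshold min_distance (i + 1) last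
  else []
termination_by data.length - i

-- A's foldl over pyRange i..len equals acc ++ aLoop i last (n bounds the remaining length).
theorem foldA_eq_aLoop (data : List Int) (threshold min_distance : Int) :
    ∀ (n i : Nat) (acc : List Int) (last : Int), data.length ≤ i + n →
    (List.foldl
      (fun (st : List Int × Int) (j : Int) =>
        if PySem.List.pyGetD data j 0 > threshold ∧ j - st.2 > min_distance then
          (st.1 ++ [j], j)
        else st)
      (acc, last)
      (PySem.List.pyRange (i : Int) data.length 1)).1
      = acc ++ aLoop data threshold min_distance i last := by
  intro n
  induction n with
  | zero =>
    intro i acc last hn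
    rw [PySem.List.pyRange_one_eq_nil (by exact_mod_cast hn), aLoop]
    simp [show ¬ i < data.length by omega]
  | succ n ih =>
    intro i acc last hn
    by_cases h : i < data.length
    · rw [PySem.List.pyRange_one_cons (by exact_mod_cast h), aLoop]
      simp only [List.foldl_cons, h, dif_pos]
      have hcast : ((i : Int) + 1) = ((i + 1 : Nat) : Int) := by push_cast; ring
      by_cases hc : PySem.List.pyGetD data (i : Int) 0 > threshold ∧ (i : Int) - last > min_distance
      · rw [if_pos hc, if_pos hc, hcast, ih (i + 1) (acc ++ [(i : Int)]) (i : Int) (by omega)]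
        simp
      · rw [if_neg hc, if_neg hc, hcast, ih (i + 1) acc last (by omega)]
    · rw [PySem.List.pyRange_one_eq_nil (by exact_mod_cast Nat.not_lt.mp h), aLoop]
      simp [h]

-- the candidate list from cursor i onwards (generalises stage 1 of B for the induction).
def candFrom (data : List Int) (threshold : Int) (i : Nat) : List Int :=
  (PySem.List.pyRange (i : Int) data.length 1).filter
    (fun j => decide (PySem.List.pyGetD data j 0 > threshold))

theorem mem_candFrom_ge (data : List Int) (threshold : Int) (i : Nat) (x : Int)
    (hx : x ∈ candFrom data threshold i) : (i : Int) ≤ x := by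
  unfold candFrom at hx
  have := (List.mem_filter.mp hx).1
  exact (PySem.List.mem_pyRange_one.mp this).1

theorem greedyPick_nil (md : Int) : greedyPick md [] = [] := by rw [greedyPick]

theorem greedyPick_cons (md c : Int) (cs : List Int) :
    greedyPick md (c :: cs) = c :: greedyPick md (cs.filter (fun x => decide (x - c > md))) := by
  rw [greedyPick]

-- Main invariant: A's loop from cursor i with anchor `last` equals B's greedy on the
-- candidates from i that are outside `last`'s window, provided `last` is either the
-- initial -min_distance or an earlier index.
theorem aLoop_eq_greedy (data : List Int) (threshold min_distance : Int) :
    ∀ (n i : Nat) (last : Int), data.length ≤ i + n → 1 ≤ i →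
    (last = -min_distance ∨ last < (i : Int)) →
    aLoop data threshold min_distance i last
      = greedyPick min_distance
          ((candFrom data threshold i).filter (fun x => decide (x - last > min_distance))) := by
  intro n
  induction n with
  | zero =>
    intro i last hn _ _
    rw [aLoop]
    unfold candFrom
    rw [PySem.List.pyRange_one_eq_nil (by exact_mod_cast hn)]
    simp [show ¬ i < data.length by omega, greedyPick_nil]
  | succ n ih =>
    intro i last hn hi hinv
    by_cases h : i < data.length
    · have hcons : candFrom data threshold i =
          if PySem.List.pyGetD data (i : Int) 0 > threshold then
            (i : Int) :: candFrom data threshold (i + 1)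
          else candFrom data threshold (i + 1) := by
        unfold candFrom
        rw [PySem.List.pyRange_one_cons (by exact_mod_cast h)]
        have hca : (((i : Nat) : Int) + 1) = ((i + 1 : Nat) : Int) := by push_cast; ring
        rw [List.filter_cons, hca]
        by_cases hd : PySem.List.pyGetD data (i : Int) 0 > threshold
        · simp
        · simp
      rw [aLoop]
      simp only [h, dif_pos]
      by_cases hd : PySem.List.pyGetD data (i : Int) 0 > threshold
      · rw [hcons, if_pos hd]
        by_cases hsel : (i : Int) - last > min_distance
        · rw [if_pos ⟨hd, hsel⟩]
          rw [List.filter_cons_of_pos (by simpa using hsel), greedyPick_cons]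
          congr 1
          rw [List.filter_filter]
          have hfe : ∀ x ∈ candFrom data threshold (i + 1),
              (decide (x - (i : Int) > min_distance) && decide (x - last > min_distance))
                = decide (x - (i : Int) > min_distance) := by
            intro x hx
            have hxi : ((i + 1 : Nat) : Int) ≤ x := mem_candFrom_ge data threshold (i + 1) x hx
            by_cases hpi : x - (i : Int) > min_distance
            · have hpl : x - last > min_distance := by
                rcases hinv with he | hl
                · subst he
                  have : (0 : Int) < x := by push_cast at hxi; omega
                  omega
                · omega
              simp [hpi, hpl]
            · simp [hpi]
          rw [List.filter_congr hfe]
          exact ih (i + 1) (i : Int) (by omega) (by omega) (Or.inr (by push_cast; omega))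
        · rw [if_neg (by intro hc; exact hsel hc.2)]
          rw [List.filter_cons_of_neg (by simpa using hsel)]
          have hlt : last < (i : Int) := by
            rcases hinv with he | hl
            · exfalso; apply hsel; subst he; omega
            · exact hl
          exact ih (i + 1) last (by omega) (by omega) (Or.inr (by push_cast; omega))
      · rw [if_neg (by intro hc; exact hd hc.1), hcons, if_neg hd]
        refine ih (i + 1) last (by omega) (by omega) ?_
        rcases hinv with he | hl
        · exact Or.inl he
        · exact Or.inr (by push_cast; omega)
    · rw [aLoop]
      unfold candFrom
      rw [PySem.List.pyRange_one_eq_nil (by exact_mod_cast Nat.not_lt.mp h)]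
      simp [h, greedyPick_nil]

-- ===== VERDICT (by name: the statement is the Claim_ definition above) =====
theorem detect_blinks_spec : Claim_equal_detect_blinks := by
  intro data threshold min_distance _
  show detect_blinks data threshold min_distance = detect_blinks_alt data threshold min_distance
  unfold detect_blinks detect_blinks_alt
  have h := foldA_eq_aLoop data threshold min_distance data.length 1 [] (-min_distance) (by omega)
  have h2 := aLoop_eq_greedy data threshold min_distance data.length 1 (-min_distance)
    (by omega) (by omega) (Or.inl rfl)
  have hfid : (candFrom data threshold 1).filter
      (fun x => decide (x - (-min_distance) > min_distance)) = candFrom data threshold 1 := by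
    apply List.filter_eq_self.mpr
    intro x hx
    have := mem_candFrom_ge data threshold 1 x hx
    simp only [decide_eq_true_eq]
    push_cast at this
    omega
  rw [h2, hfid] at h
  simpa [candFrom] using h
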